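-- pv_equiv track=rewrite | github.com/williamcommu/specifinput | gui/main_window.py | convert_to_tkinter_format
-- ===== SOURCE A (Python) =====
-- def convert_to_tkinter_format(user_format):
--     """Convert user-friendly format (ctrl+shift+f) to Tkinter format (Control-Shift-f)"""
--     if "+" not in user_format:
--         return user_format
--
--     parts = user_format.split("+")
--     modifiers = []
--
--     # Sort modifiers for consistent ordering
--     for part in parts[:-1]:  # All but the last part are modifiers
--         part = part.strip().lower()
--         if part == "ctrl":
--             modifiers.append(("Control", 0))
--         elif part == "alt":
--             modifiers.append(("Alt", 1))
--         elif part == "shift":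
--             modifiers.append(("Shift", 2))
--         elif part == "cmd":
--             modifiers.append(("Command", 3))
--         else:
--             modifiers.append((part.capitalize(), 4))
--
--     # Sort modifiers by priority
--     modifiers.sort(key=lambda x: x[1])
--     tkinter_parts = [mod[0] for mod in modifiers]
--
--     # Add the actual key
--     key = parts[-1].strip()
--     tkinter_parts.append(key)
--
--     return "-".join(tkinter_parts)
-- ===== SOURCE B (Python) =====
-- def convert_to_tkinter_format(user_format):
--     """Convert user-friendly format (ctrl+shift+f) to Tkinter format (Control-Shift-f)"""
--     if "+" not in user_format:
--         return user_format
--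
--     parts = user_format.split("+")
--
--     # Five priority buckets instead of collecting pairs and sorting:
--     # known modifiers have fixed priorities 0-3, unknown ones share bucket 4,
--     # and appending preserves the original order inside each bucket.
--     buckets = [[], [], [], [], []]
--     for part in parts[:-1]:
--         part = part.strip().lower()
--         if part == "ctrl":
--             buckets[0].append("Control")
--         elif part == "alt":
--             buckets[1].append("Alt")
--         elif part == "shift":
--             buckets[2].append("Shift")
--         elif part == "cmd":
--             buckets[3].append("Command")
--         else:
--             buckets[4].append(part.capitalize())
--
--     names = buckets[0] + buckets[1] + buckets[2] + buckets[3] + buckets[4]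
--     names.append(parts[-1].strip())
--     return "-".join(names)
-- ===== Notes on version B (the rewrite author's own statement) =====
-- stated objective: alternative
-- what changed: Instead of collecting (name, priority) pairs and stably sorting them, B appends each mapped modifier name into one of five fixed priority buckets in a single pass and concatenates the buckets in index order, which reproduces the stable sort exactly.
import Mathlib
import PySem

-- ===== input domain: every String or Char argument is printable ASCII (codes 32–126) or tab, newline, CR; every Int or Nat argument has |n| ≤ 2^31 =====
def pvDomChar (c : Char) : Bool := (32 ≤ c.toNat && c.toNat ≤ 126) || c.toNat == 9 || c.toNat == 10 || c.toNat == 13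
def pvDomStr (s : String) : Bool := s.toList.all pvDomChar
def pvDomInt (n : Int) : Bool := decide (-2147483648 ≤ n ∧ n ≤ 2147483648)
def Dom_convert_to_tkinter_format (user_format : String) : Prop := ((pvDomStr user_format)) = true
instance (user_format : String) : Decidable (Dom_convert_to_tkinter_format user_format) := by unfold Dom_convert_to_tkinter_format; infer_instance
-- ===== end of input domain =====

-- B replaces A's collect-pairs-then-stable-sort of modifiers by five priority buckets
-- filled in one pass and concatenated in index order (objective: alternative decomposition).


-- ===== PORT A =====
-- str.capitalize(), ported by hand: first char uppercased, the rest lowercased (exact on ASCII)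
def pvCapitalize (cs : List Char) : List Char :=
  match cs with
  | [] => []
  | c :: t => PySem.Chars.upperChar c :: PySem.Chars.lower t

-- one iteration of A's modifier loop: part.strip().lower(), then the if/elif chain giving (name, priority)
def pvModPair (part : List Char) : List Char × Int :=
  let p := PySem.Chars.lower (PySem.Chars.strip part)
  if p = "ctrl".toList then ("Control".toList, 0)
  else if p = "alt".toList then ("Alt".toList, 1)
  else if p = "shift".toList then ("Shift".toList, 2)
  else if p = "cmd".toList then ("Command".toList, 3)
  else (pvCapitalize p, 4)

def convert_to_tkinter_format (user_format : String) : String :=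
  if PySem.Str.isIn "+" user_format = false then user_format
  else
    let parts := PySem.Chars.splitOn user_format.toList "+".toList
    let modifiers := (PySem.List.slice parts none (some (-1))).foldl
      (fun acc part => acc ++ [pvModPair part]) []
    let sortedMods := PySem.List.sorted modifiers (fun x => x.2)
    let tkinterParts := sortedMods.map (fun m => m.1)
    -- parts[-1]: str.split always returns a non-empty list, so the default is never used
    let key := PySem.Chars.strip (PySem.List.pyGetD parts (-1) [])
    String.ofList (PySem.Chars.join "-".toList (tkinterParts ++ [key]))

-- ===== PORT B =====
-- one iteration of B's loop: append the mapped name to the bucket of its priority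
def pvBucketStep
    (b : List (List Char) × List (List Char) × List (List Char) × List (List Char) × List (List Char))
    (part : List Char) :
    List (List Char) × List (List Char) × List (List Char) × List (List Char) × List (List Char) :=
  let p := PySem.Chars.lower (PySem.Chars.strip part)
  if p = "ctrl".toList then (b.1 ++ ["Control".toList], b.2.1, b.2.2.1, b.2.2.2.1, b.2.2.2.2)
  else if p = "alt".toList then (b.1, b.2.1 ++ ["Alt".toList], b.2.2.1, b.2.2.2.1, b.2.2.2.2)
  else if p = "shift".toList then (b.1, b.2.1, b.2.2.1 ++ ["Shift".toList], b.2.2.2.1, b.2.2.2.2)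
  else if p = "cmd".toList then (b.1, b.2.1, b.2.2.1, b.2.2.2.1 ++ ["Command".toList], b.2.2.2.2)
  else (b.1, b.2.1, b.2.2.1, b.2.2.2.1, b.2.2.2.2 ++ [pvCapitalize p])

def convert_to_tkinter_format_alt (user_format : String) : String :=
  if PySem.Str.isIn "+" user_format = false then user_format
  else
    let parts := PySem.Chars.splitOn user_format.toList "+".toList
    let b := (PySem.List.slice parts none (some (-1))).foldl pvBucketStep ([], [], [], [], [])
    let names := b.1 ++ b.2.1 ++ b.2.2.1 ++ b.2.2.2.1 ++ b.2.2.2.2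
    let key := PySem.Chars.strip (PySem.List.pyGetD parts (-1) [])
    String.ofList (PySem.Chars.join "-".toList (names ++ [key]))

-- ===== PRECONDITION & SPEC =====
def Spec_convert_to_tkinter_format (user_format : String) (out : String) : Prop := out = convert_to_tkinter_format_alt user_format
instance (user_format : String) (out : String) : Decidable (Spec_convert_to_tkinter_format user_format out) := by unfold Spec_convert_to_tkinter_format; infer_instance

-- ===== CLAIM (what is proved, stated in full; the proofs are below) =====
def Claim_equal_convert_to_tkinter_format : Prop := ∀ (user_format : String), Dom_convert_to_tkinter_format user_format → Spec_convert_to_tkinter_format user_format (convert_to_tkinter_format user_format)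

-- ===== LEMMAS AND PROOFS =====

-- the modifiers whose priority is k, in their original order
def pvBucket (k : Int) (ms : List (List Char × Int)) : List (List Char × Int) :=
  ms.filter (fun m => m.2 == k)

lemma pvBucket_append_singleton (k : Int) (t : List (List Char × Int)) (x : List Char × Int) :
    pvBucket k (t ++ [x]) = pvBucket k t ++ if x.2 == k then [x] else [] := by
  simp only [pvBucket, List.filter_append, List.filter_singleton]
  cases h : x.2 == k <;> simp_all

lemma insertBy_middle (x : List Char × Int) (p q : List (List Char × Int))
    (hp : ∀ y ∈ p, ¬ x.2 < y.2) (hq : ∀ y ∈ q, x.2 < y.2) :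
    PySem.List.insertBy (fun a b => decide (a.2 < b.2)) x (p ++ q) = p ++ x :: q := by
  induction p with
  | nil =>
      cases q with
      | nil => simp [PySem.List.insertBy]
      | cons y t => simp [PySem.List.insertBy, hq y (by simp)]
  | cons y t ih =>
      have h1 : ¬ x.2 < y.2 := hp y (by simp)
      simp [PySem.List.insertBy, h1, ih (fun z hz => hp z (by simp [hz]))]

lemma mem_pvBucket_snd {k : Int} {y : List Char × Int} {ms : List (List Char × Int)}
    (hy : y ∈ pvBucket k ms) : y.2 = k := by
  have := (List.mem_filter.mp hy).2
  simpa using this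

-- a stable sort on priorities drawn from {0,…,4} is the concatenation of the five buckets
lemma sorted_eq_buckets (ms : List (List Char × Int))
    (h : ∀ m ∈ ms, m.2 = 0 ∨ m.2 = 1 ∨ m.2 = 2 ∨ m.2 = 3 ∨ m.2 = 4) :
    PySem.List.sorted ms (fun x => x.2) =
      pvBucket 0 ms ++ (pvBucket 1 ms ++ (pvBucket 2 ms ++ (pvBucket 3 ms ++ pvBucket 4 ms))) := by
  induction ms using List.reverseRecOn with
  | nil => simp [pvBucket, PySem.List.sorted_eq_foldl_insertBy]
  | append_singleton t x ih =>
      have ih' := ih (fun m hm => h m (by simp [hm]))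
      rw [PySem.List.sorted_eq_foldl_insertBy, List.foldl_append, List.foldl_cons, List.foldl_nil,
        ← PySem.List.sorted_eq_foldl_insertBy, ih']
      have hx := h x (by simp)
      rcases hx with h0 | h1 | h2 | h3 | h4
      · rw [insertBy_middle x (pvBucket 0 t)
              (pvBucket 1 t ++ (pvBucket 2 t ++ (pvBucket 3 t ++ pvBucket 4 t)))
              (by intro y hy; have := mem_pvBucket_snd hy; omega)
              (by intro y hy
                  simp only [List.mem_append] at hy
                  rcases hy with hy | hy | hy | hy <;>
                    (have := mem_pvBucket_snd hy; omega))]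
        simp [pvBucket_append_singleton, h0]
      · rw [show pvBucket 0 t ++ (pvBucket 1 t ++ (pvBucket 2 t ++ (pvBucket 3 t ++ pvBucket 4 t)))
              = (pvBucket 0 t ++ pvBucket 1 t) ++ (pvBucket 2 t ++ (pvBucket 3 t ++ pvBucket 4 t)) by
              simp [List.append_assoc]]
        rw [insertBy_middle x (pvBucket 0 t ++ pvBucket 1 t)
              (pvBucket 2 t ++ (pvBucket 3 t ++ pvBucket 4 t))
              (by intro y hy
                  simp only [List.mem_append] at hy
                  rcases hy with hy | hy <;> (have := mem_pvBucket_snd hy; omega))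
              (by intro y hy
                  simp only [List.mem_append] at hy
                  rcases hy with hy | hy | hy <;> (have := mem_pvBucket_snd hy; omega))]
        simp [pvBucket_append_singleton, h1]
      · rw [show pvBucket 0 t ++ (pvBucket 1 t ++ (pvBucket 2 t ++ (pvBucket 3 t ++ pvBucket 4 t)))
              = (pvBucket 0 t ++ (pvBucket 1 t ++ pvBucket 2 t)) ++ (pvBucket 3 t ++ pvBucket 4 t) by
              simp [List.append_assoc]]
        rw [insertBy_middle x (pvBucket 0 t ++ (pvBucket 1 t ++ pvBucket 2 t))
              (pvBucket 3 t ++ pvBucket 4 t)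
              (by intro y hy
                  simp only [List.mem_append] at hy
                  rcases hy with hy | hy | hy <;> (have := mem_pvBucket_snd hy; omega))
              (by intro y hy
                  simp only [List.mem_append] at hy
                  rcases hy with hy | hy <;> (have := mem_pvBucket_snd hy; omega))]
        simp [pvBucket_append_singleton, h2]
      · rw [show pvBucket 0 t ++ (pvBucket 1 t ++ (pvBucket 2 t ++ (pvBucket 3 t ++ pvBucket 4 t)))
              = (pvBucket 0 t ++ (pvBucket 1 t ++ (pvBucket 2 t ++ pvBucket 3 t))) ++ pvBucket 4 t by
              simp [List.append_assoc]]
        rw [insertBy_middle x (pvBucket 0 t ++ (pvBucket 1 t ++ (pvBucket 2 t ++ pvBucket 3 t)))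
              (pvBucket 4 t)
              (by intro y hy
                  simp only [List.mem_append] at hy
                  rcases hy with hy | hy | hy | hy <;> (have := mem_pvBucket_snd hy; omega))
              (by intro y hy; have := mem_pvBucket_snd hy; omega)]
        simp [pvBucket_append_singleton, h3]
      · rw [show pvBucket 0 t ++ (pvBucket 1 t ++ (pvBucket 2 t ++ (pvBucket 3 t ++ pvBucket 4 t)))
              = (pvBucket 0 t ++ (pvBucket 1 t ++ (pvBucket 2 t ++ (pvBucket 3 t ++ pvBucket 4 t)))) ++ [] by
              simp]
        rw [insertBy_middle x
              (pvBucket 0 t ++ (pvBucket 1 t ++ (pvBucket 2 t ++ (pvBucket 3 t ++ pvBucket 4 t)))) []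
              (by intro y hy
                  simp only [List.mem_append] at hy
                  rcases hy with hy | hy | hy | hy | hy <;> (have := mem_pvBucket_snd hy; omega))
              (by intro y hy; simp at hy)]
        simp [pvBucket_append_singleton, h4]

-- B's bucket fold computes exactly the name projections of the five buckets of A's pairs
lemma foldl_bucketStep (l : List (List Char)) (b0 b1 b2 b3 b4 : List (List Char)) :
    l.foldl pvBucketStep (b0, b1, b2, b3, b4) =
      (b0 ++ (pvBucket 0 (l.map pvModPair)).map (fun m => m.1),
       b1 ++ (pvBucket 1 (l.map pvModPair)).map (fun m => m.1),
       b2 ++ (pvBucket 2 (l.map pvModPair)).map (fun m => m.1),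
       b3 ++ (pvBucket 3 (l.map pvModPair)).map (fun m => m.1),
       b4 ++ (pvBucket 4 (l.map pvModPair)).map (fun m => m.1)) := by
  induction l generalizing b0 b1 b2 b3 b4 with
  | nil => simp [pvBucket]
  | cons p t ih =>
      simp only [List.foldl_cons, List.map_cons, pvBucketStep, pvModPair, pvBucket]
      split_ifs with h1 h2 h3 h4 <;>
        simp [ih, pvBucket]

-- every priority pvModPair produces lies in {0,…,4}
lemma pvModPair_snd (part : List Char) :
    (pvModPair part).2 = 0 ∨ (pvModPair part).2 = 1 ∨ (pvModPair part).2 = 2 ∨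
      (pvModPair part).2 = 3 ∨ (pvModPair part).2 = 4 := by
  simp only [pvModPair]
  split_ifs <;> simp

-- ===== VERDICT (by name: the statement is the Claim_ definition above) =====
theorem convert_to_tkinter_format_spec : Claim_equal_convert_to_tkinter_format := by
  intro s _hd
  unfold Spec_convert_to_tkinter_format convert_to_tkinter_format convert_to_tkinter_format_alt
  by_cases hplus : PySem.Str.isIn "+" s = false
  · rw [if_pos hplus, if_pos hplus]
  · rw [if_neg hplus, if_neg hplus]
    dsimp only
    rw [PySem.List.foldl_append_singleton_eq_map, List.nil_append, foldl_bucketStep,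
      sorted_eq_buckets _ (by
        rintro m hm
        rcases List.mem_map.mp hm with ⟨part, _, rfl⟩
        exact pvModPair_snd part)]
    simp [List.map_append, List.append_assoc]
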